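-- pv_equiv track=rewrite | github.com/NASymmetry/MolSym | rhf/hf.py | ERI_indicies
-- ===== SOURCE A (Python) =====
-- def ERI_indicies(irreplength):
--     vec = []
--     start = 0
--     total = 0
--     for a, i in enumerate(irreplength):
--         if i == 0:
--             vec.append(None)
--         elif a > 0:
--             vec.append([total + 1,total + i])
--         else:
--             vec.append([start,i])
--         total += i
--         start = i
--     return vec
-- ===== SOURCE B (Python) =====
-- def ERI_indicies(irreplength):
--     # two passes: build the cumulative-sum table first, then map indices through it
--     offsets = []
--     t = 0
--     for i in irreplength:
--         t += i
--         offsets.append(t)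
--     return [None if i == 0
--             else ([0, i] if a == 0 else [offsets[a - 1] + 1, offsets[a]])
--             for a, i in enumerate(irreplength)]
-- ===== Notes on version B (the rewrite author's own statement) =====
-- stated objective: alternative
-- what changed: Replaces A's single stateful pass (running total/start accumulator carried through the loop) with two passes: first build the cumulative-sum table of irreplength, then map each (index, length) pair through that table by lookup.
import Mathlib
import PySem

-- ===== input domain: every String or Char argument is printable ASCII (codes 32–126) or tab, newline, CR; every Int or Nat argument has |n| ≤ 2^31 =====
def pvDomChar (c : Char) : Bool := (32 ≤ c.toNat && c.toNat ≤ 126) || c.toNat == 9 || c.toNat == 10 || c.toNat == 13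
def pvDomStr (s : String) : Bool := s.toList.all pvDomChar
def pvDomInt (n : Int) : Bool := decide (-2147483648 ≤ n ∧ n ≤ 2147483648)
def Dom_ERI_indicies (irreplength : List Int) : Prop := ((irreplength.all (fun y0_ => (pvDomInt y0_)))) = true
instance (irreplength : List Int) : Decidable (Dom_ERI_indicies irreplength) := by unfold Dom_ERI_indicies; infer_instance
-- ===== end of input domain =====

-- B replaces A's single stateful accumulator pass by building the cumulative-sum table first
-- and then mapping each (index, length) pair through it (objective: alternative decomposition).

-- ===== PORT A =====
-- one pass over enumerate(irreplength) carrying (vec, start, total)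
def ERI_indicies (irreplength : List Int) : List (Option (List Int)) :=
  ((PySem.List.enumerate irreplength).foldl
    (fun (st : List (Option (List Int)) × Int × Int) ai =>
      let vec :=
        if ai.2 = 0 then st.1 ++ [none]
        else if ai.1 > 0 then st.1 ++ [some [st.2.2 + 1, st.2.2 + ai.2]]
        else st.1 ++ [some [st.2.1, ai.2]]
      (vec, ai.2, st.2.2 + ai.2)) ([], 0, 0)).1

-- ===== PORT B =====
-- pass 1: cumulative-sum table; pass 2: map each enumerated pair through lookups
def ERI_indicies_alt (irreplength : List Int) : List (Option (List Int)) :=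
  let offsets := (irreplength.foldl
    (fun (st : List Int × Int) i => (st.1 ++ [st.2 + i], st.2 + i)) ([], 0)).1
  (PySem.List.enumerate irreplength).map (fun ai =>
    if ai.2 = 0 then none
    else if ai.1 = 0 then some [0, ai.2]
    else some [PySem.List.pyGetD offsets (ai.1 - 1) 0 + 1,
               PySem.List.pyGetD offsets ai.1 0])

-- ===== PRECONDITION & SPEC =====
def Spec_ERI_indicies (irreplength : List Int) (out : List (Option (List Int))) : Prop := out = ERI_indicies_alt irreplength
instance (irreplength : List Int) (out : List (Option (List Int))) : Decidable (Spec_ERI_indicies irreplength out) := by unfold Spec_ERI_indicies; infer_instance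

-- ===== CLAIM (what is proved, stated in full; the proofs are below) =====
def Claim_equal_ERI_indicies : Prop := ∀ (irreplength : List Int), Dom_ERI_indicies irreplength → Spec_ERI_indicies irreplength (ERI_indicies irreplength)

-- ===== LEMMAS AND PROOFS =====

-- prefix sums starting from t
def pvPre (t : Int) : List Int → List Int
  | [] => []
  | i :: r => (t + i) :: pvPre (t + i) r

theorem pvPre_spec : ∀ (l : List Int) (os : List Int) (t : Int),
    l.foldl (fun (st : List Int × Int) i => (st.1 ++ [st.2 + i], st.2 + i)) (os, t)
      = (os ++ pvPre t l, t + l.sum) := by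
  intro l
  induction l with
  | nil => intro os t; simp [pvPre]
  | cons i r ih => intro os t; simp [pvPre, ih, add_assoc]

theorem pvPre_length : ∀ (l : List Int) (t : Int), (pvPre t l).length = l.length := by
  intro l; induction l with
  | nil => intro t; simp [pvPre]
  | cons i r ih => intro t; simp [pvPre, ih]

theorem pvPre_append : ∀ (l : List Int) (t x : Int),
    pvPre t (l ++ [x]) = pvPre t l ++ [t + l.sum + x] := by
  intro l; induction l with
  | nil => intro t x; simp [pvPre]
  | cons i r ih => intro t x; simp [pvPre, ih, add_assoc]

theorem pvPre_getD_last : ∀ (l : List Int) (t : Int), l ≠ [] →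
    (pvPre t l).getD (l.length - 1) 0 = t + l.sum := by
  intro l
  induction l with
  | nil => intro t h; exact absurd rfl h
  | cons i r ih =>
    intro t _
    cases r with
    | nil => simp [pvPre]
    | cons j s =>
      have := ih (t + i) (by simp)
      simp only [pvPre, List.length_cons] at this ⊢
      simpa [add_assoc] using this

-- the sum component of A's fold state
theorem pvSumA : ∀ (l : List Int) (k : Int)
    (init : List (Option (List Int)) × Int × Int),
    ((PySem.List.enumerate l k).foldl
      (fun (st : List (Option (List Int)) × Int × Int) ai =>
        let vec :=
          if ai.2 = 0 then st.1 ++ [none]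
          else if ai.1 > 0 then st.1 ++ [some [st.2.2 + 1, st.2.2 + ai.2]]
          else st.1 ++ [some [st.2.1, ai.2]]
        (vec, ai.2, st.2.2 + ai.2)) init).2.2 = init.2.2 + l.sum := by
  intro l
  induction l with
  | nil => intro k init; simp [PySem.List.enumerate_nil]
  | cons i r ih =>
    intro k init
    simp only [PySem.List.enumerate_cons, List.foldl_cons, ih, List.sum_cons]
    ring

-- pyGetD into a list extended on the right, index within the left part
theorem pvGetD_append_left (ys zs : List Int) (n : Nat) (h : n < ys.length) (d : Int) :
    PySem.List.pyGetD (ys ++ zs) (n : Int) d = PySem.List.pyGetD ys (n : Int) d := by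
  simp [PySem.List.pyGetD_natCast, List.getD_eq_getElem?_getD, List.getElem?_append_left h]

theorem pvGetD_append_right (ys : List Int) (v d : Int) :
    PySem.List.pyGetD (ys ++ [v]) (ys.length : Int) d = v := by
  simp [PySem.List.pyGetD_natCast, List.getD_eq_getElem?_getD]

-- B on a list extended on the right
theorem pvB_append (xs : List Int) (x : Int) :
    ERI_indicies_alt (xs ++ [x]) = ERI_indicies_alt xs ++
      [if x = 0 then none
       else if xs.length = 0 then some [0, x]
       else some [xs.sum + 1, xs.sum + x]] := by
  unfold ERI_indicies_alt
  simp only [pvPre_spec]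
  simp only [List.nil_append, pvPre_append]
  rw [PySem.List.enumerate_append]
  rw [List.map_append]
  congr 1
  · apply List.map_congr_left
    intro p hp
    rw [PySem.List.mem_enumerate_iff] at hp
    obtain ⟨k, hk, rfl⟩ := hp
    by_cases h0 : xs[k] = 0
    · simp [h0]
    · simp only [zero_add, h0]
      by_cases hk0 : k = 0
      · simp [hk0]
      · have hkpos : (0 : Int) < (k : Int) := by exact_mod_cast Nat.pos_of_ne_zero hk0
        have hne : ((k : Int) ≠ 0) := ne_of_gt hkpos
        have h1 : ((k : Int) - 1) = ((k - 1 : Nat) : Int) := by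
          push_cast [Nat.cast_sub (Nat.one_le_iff_ne_zero.mpr hk0)]; ring
        have hlen : (pvPre 0 xs).length = xs.length := pvPre_length xs 0
        rw [if_neg hne, if_neg hne, h1,
          pvGetD_append_left _ _ _ (by omega : k - 1 < (pvPre 0 xs).length),
          pvGetD_append_left _ _ _ (by omega : k < (pvPre 0 xs).length)]
  · simp only [PySem.List.enumerate_cons, PySem.List.enumerate_nil, List.map_cons,
      List.map_nil, zero_add]
    by_cases hx : x = 0
    · simp [hx]
    · simp only [hx, ite_false]
      by_cases hxs : xs = []
      · subst hxs; simp
      · have hlpos : 0 < xs.length := List.length_pos_iff.mpr hxs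
        have hne : ((xs.length : Int) ≠ 0) := by exact_mod_cast Nat.pos_iff_ne_zero.mp hlpos
        have hlen0 : xs.length ≠ 0 := Nat.pos_iff_ne_zero.mp hlpos
        have hlen : (pvPre 0 xs).length = xs.length := pvPre_length xs 0
        have h1 : ((xs.length : Int) - 1) = ((xs.length - 1 : Nat) : Int) := by
          push_cast [Nat.cast_sub (Nat.one_le_iff_ne_zero.mpr hlen0)]; ring
        rw [if_neg hne, if_neg hlen0, h1,
          pvGetD_append_left _ _ _ (by omega : xs.length - 1 < (pvPre 0 xs).length)]
        have hlast := pvPre_getD_last xs 0 hxs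
        have hright : PySem.List.pyGetD (pvPre 0 xs ++ [xs.sum + x]) ((xs.length : Int)) 0
            = xs.sum + x := by
          rw [← hlen]; exact pvGetD_append_right _ _ _
        rw [hright]
        rw [List.getD_eq_getElem?_getD] at hlast
        simp only [zero_add] at hlast
        simp [PySem.List.pyGetD_natCast, hlast]

-- A on a list extended on the right
theorem pvA_append (xs : List Int) (x : Int) :
    ERI_indicies (xs ++ [x]) = ERI_indicies xs ++
      [if x = 0 then none
       else if xs.length = 0 then some [0, x]
       else some [xs.sum + 1, xs.sum + x]] := by
  unfold ERI_indicies
  rw [PySem.List.enumerate_append, List.foldl_append]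
  simp only [PySem.List.enumerate_cons, PySem.List.enumerate_nil, List.foldl_cons,
    List.foldl_nil]
  by_cases hx : x = 0
  · simp [hx]
  · by_cases hxs : xs = []
    · subst hxs; simp [hx, PySem.List.enumerate_nil]
    · have hlpos : 0 < xs.length := List.length_pos_iff.mpr hxs
      have hlen0 : xs.length ≠ 0 := Nat.pos_iff_ne_zero.mp hlpos
      have hsum := pvSumA xs 0 ([], 0, 0)
      simp at hsum
      simp [hx, hlpos, hlen0, hsum]

theorem pvMain : ∀ (l : List Int), ERI_indicies l = ERI_indicies_alt l := by
  intro l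
  induction l using List.reverseRecOn with
  | nil => rfl
  | append_singleton xs x ih => rw [pvA_append, pvB_append, ih]

-- ===== VERDICT (by name: the statement is the Claim_ definition above) =====
theorem ERI_indicies_spec : Claim_equal_ERI_indicies := by
  intro l _
  unfold Spec_ERI_indicies
  exact pvMain l
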